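-- pv_equiv track=rewrite | github.com/mustaphaezzali/Train-optimizer | functions/optimal_tickets.py | time_select
-- ===== SOURCE A (Python) =====
-- from operator import itemgetter
--
-- def time_select(heure_depart, list):
--
--     # sorting the list to times that are the closest to the wanted user value
--
--     temp_list = list.copy()
--
--     for k in temp_list :
--
--         #making a list of the time difference between the wanted time and the available time
--
--         diff_temp = abs(k[1] - heure_depart)
--
--         k[1] = diff_temp
--
--
--     # sorting the list via the difference time
--
--     T = sorted(temp_list, key = itemgetter(1))
--
--
--
--     for k in T :
--
--         # we add back the difference(wanted time) the difference list
--
--         if (k[1] + heure_depart) > k[3]  :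
--
--             temp_var = heure_depart - k[1]
--
--             k[1] = temp_var
--
--         else :
--
--             temp_var = heure_depart + k[1]
--
--             k[1] = temp_var
--
--     return T
-- ===== SOURCE B (Python) =====
-- def time_select(heure_depart, list):
--     # Bucket the rows by their distance to the wanted time (a dict keyed by the
--     # distance, groups keep original order), then walk the distinct distances in
--     # increasing order, fixing each row's time as it is emitted.  No comparison
--     # sort of the rows themselves; ties share a bucket, so original order is kept.
--     groups = {}
--     for r in list:
--         groups.setdefault(abs(r[1] - heure_depart), []).append(r)
--     T = []
--     for d in sorted(groups):
--         for r in groups[d]: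
--             r[1] = heure_depart - d if heure_depart + d > r[3] else heure_depart + d
--             T.append(r)
--     return T
-- ===== Notes on version B (the rewrite author's own statement) =====
-- stated objective: alternative
-- what changed: B replaces A's mutate-then-comparison-sort of the rows by bucketing rows into a dict keyed by their distance to the wanted time and emitting the buckets while walking only the distinct distances in increasing order, recomputing each row's time on emission; ties share a bucket so original order is preserved without a stable row sort.
import Mathlib
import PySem

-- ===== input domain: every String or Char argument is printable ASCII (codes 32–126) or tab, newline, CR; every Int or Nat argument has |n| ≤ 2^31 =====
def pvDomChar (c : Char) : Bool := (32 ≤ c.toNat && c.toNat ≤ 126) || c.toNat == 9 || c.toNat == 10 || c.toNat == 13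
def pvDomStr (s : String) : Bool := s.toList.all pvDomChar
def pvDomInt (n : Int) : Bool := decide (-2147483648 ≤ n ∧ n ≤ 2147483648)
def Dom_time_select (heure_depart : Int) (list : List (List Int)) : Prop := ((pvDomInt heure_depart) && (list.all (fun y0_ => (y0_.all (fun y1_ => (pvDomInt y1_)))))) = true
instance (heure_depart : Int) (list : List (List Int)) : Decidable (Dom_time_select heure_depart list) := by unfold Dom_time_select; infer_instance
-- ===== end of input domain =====

-- B replaces A's mutate-then-sort of the rows by bucketing rows into a dict keyed by their
-- distance to the wanted time and emitting the buckets over the sorted distinct distances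
-- (objective: alternative).  Both Pythons mutate the shared row lists in place to the same
-- final values; the equivalence proved here is about the RETURN value.

-- ===== PORT A =====
-- first loop body: k[1] = abs(k[1] - heure_depart)
def aDiffRow (heure_depart : Int) (k : List Int) : List Int :=
  k.set 1 (|((PySem.List.pyGet? k 1).getD 0) - heure_depart|)

-- second loop body: restore a concrete time from the stored difference
def aRestoreRow (heure_depart : Int) (k : List Int) : List Int :=
  let k1 := (PySem.List.pyGet? k 1).getD 0
  if ((PySem.List.pyGet? k 1).getD 0) + heure_depart > (PySem.List.pyGet? k 3).getD 0 then
    k.set 1 (heure_depart - k1)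
  else
    k.set 1 (heure_depart + k1)

def time_select (heure_depart : Int) (list : List (List Int)) : List (List Int) :=
  let temp_list := list.map (aDiffRow heure_depart)
  let T := PySem.List.sorted temp_list (fun k => (PySem.List.pyGet? k 1).getD 0) false
  T.map (aRestoreRow heure_depart)

-- ===== PORT B =====
-- the bucket key: abs(r[1] - heure_depart)
def bKey (heure_depart : Int) (r : List Int) : Int :=
  |((PySem.List.pyGet? r 1).getD 0) - heure_depart|

-- inner-loop body: r[1] = heure_depart - d if heure_depart + d > r[3] else heure_depart + d
def bEmitRow (heure_depart : Int) (d : Int) (r : List Int) : List Int :=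
  if heure_depart + d > (PySem.List.pyGet? r 3).getD 0 then
    r.set 1 (heure_depart - d)
  else
    r.set 1 (heure_depart + d)

def time_select_alt (heure_depart : Int) (list : List (List Int)) : List (List Int) :=
  -- groups.setdefault(abs(r[1] - heure_depart), []).append(r)
  let groups := list.foldl
    (fun g r => g.modify (bKey heure_depart r) ([] : List (List Int)) (fun v => v ++ [r]))
    PySem.Dict.empty
  -- for d in sorted(groups): for r in groups[d]: …; T.append(r)
  let ds := PySem.List.sorted groups.keys (fun x => x) false
  ds.foldl
    (fun T d => (groups.getD d []).foldl (fun T r => T ++ [bEmitRow heure_depart d r]) T)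
    []

-- ===== PRECONDITION & SPEC =====
-- A (and B) raise IndexError on any row shorter than 4 (k[1] or k[3] missing); exactly those inputs are excluded.
def Pre_time_select (heure_depart : Int) (list : List (List Int)) : Prop :=
  ∀ r ∈ list, 4 ≤ r.length
instance (heure_depart : Int) (list : List (List Int)) : Decidable (Pre_time_select heure_depart list) := by unfold Pre_time_select; infer_instance

def pvWitness_time_select : Int × List (List Int) := (10, [[1, 8, 0, 9], [2, 14, 0, 20], [3, 12, 0, 11]])

def Spec_time_select (heure_depart : Int) (list : List (List Int)) (out : List (List Int)) : Prop := out = time_select_alt heure_depart list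
instance (heure_depart : Int) (list : List (List Int)) (out : List (List Int)) : Decidable (Spec_time_select heure_depart list out) := by unfold Spec_time_select; infer_instance

-- ===== CLAIM (what is proved, stated in full; the proofs are below) =====
def Claim_equal_time_select : Prop := ∀ (heure_depart : Int) (list : List (List Int)), Dom_time_select heure_depart list → Pre_time_select heure_depart list → Spec_time_select heure_depart list (time_select heure_depart list)

-- ===== LEMMAS AND PROOFS =====

theorem pyGet1 (a b c d : Int) (t : List Int) : PySem.List.pyGet? (a::b::c::d::t) 1 = some b := by
  rw [show (1:Int) = ((1:Nat):Int) by norm_num, PySem.List.pyGet?_natCast]; rfl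

theorem pyGet3 (a b c d : Int) (t : List Int) : PySem.List.pyGet? (a::b::c::d::t) 3 = some d := by
  rw [show (3:Int) = ((3:Nat):Int) by norm_num, PySem.List.pyGet?_natCast]; rfl

-- A's first loop body on a row of length ≥ 4, written out
theorem diffRow_cons (hd a b c d : Int) (t : List Int) :
    aDiffRow hd (a::b::c::d::t) = a :: |b - hd| :: c :: d :: t := by
  simp [aDiffRow, pyGet1, List.set]

-- mapping through insertBy when the comparisons agree
theorem map_insertBy {α : Type} (f : α → α) (b1 b2 : α → α → Bool) (x : α) (ys : List α)
    (h : ∀ a ∈ ys, b1 (f x) (f a) = b2 x a) :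
    PySem.List.insertBy b1 (f x) (ys.map f) = (PySem.List.insertBy b2 x ys).map f := by
  induction ys with
  | nil => rfl
  | cons y ys ih =>
    have hy := h y (by simp)
    simp only [List.map_cons, PySem.List.insertBy, hy]
    by_cases hb : b2 x y = true
    · simp [hb]
    · simp [hb, ih (fun a ha => h a (by simp [ha]))]

-- the stable insertion-sort fold commutes with map when the keys correspond on all inputs
theorem foldl_insertBy_map {α κ : Type} [LinearOrder κ] (f : α → α) (k1 k2 : α → κ)
    (xs acc : List α)
    (hxs : ∀ x ∈ xs, k1 (f x) = k2 x) (hacc : ∀ a ∈ acc, k1 (f a) = k2 a) :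
    List.foldl (fun acc x => PySem.List.insertBy (fun a b => decide (k1 a < k1 b)) x acc)
      (acc.map f) (xs.map f)
      = (List.foldl (fun acc x => PySem.List.insertBy (fun a b => decide (k2 a < k2 b)) x acc)
          acc xs).map f := by
  induction xs generalizing acc with
  | nil => simp
  | cons x xs ih =>
    simp only [List.map_cons, List.foldl_cons]
    rw [map_insertBy f _ _ x acc
      (fun a ha => by rw [hxs x (by simp), hacc a ha])]
    exact ih _ (fun y hy => hxs y (by simp [hy]))
      (fun a ha => by
        rcases (PySem.List.mem_insertBy _ _ _ _).1 ha with h | h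
        · rw [h]; exact hxs x (by simp)
        · exact hacc a h)

theorem sorted_map_key_eq {α κ : Type} [LinearOrder κ] (f : α → α) (k1 k2 : α → κ)
    (xs : List α) (h : ∀ x ∈ xs, k1 (f x) = k2 x) :
    PySem.List.sorted (xs.map f) k1 false = (PySem.List.sorted xs k2 false).map f := by
  rw [PySem.List.sorted_eq_foldl_insertBy, PySem.List.sorted_eq_foldl_insertBy]
  exact foldl_insertBy_map f k1 k2 xs [] h (by simp)

-- on a row with at least 4 entries, A's key on the mutated row equals B's bucket key
theorem key_eq_of_len (hd : Int) (r : List Int) (h : 4 ≤ r.length) :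
    (PySem.List.pyGet? (aDiffRow hd r) 1).getD 0 = bKey hd r := by
  match r, h with
  | a :: b :: c :: d :: t, _ =>
    rw [diffRow_cons]; unfold bKey; rw [pyGet1, pyGet1]; rfl

-- on a row with at least 4 entries, A's restore after the diff mutation equals B's emit
theorem row_eq_of_len (hd : Int) (r : List Int) (h : 4 ≤ r.length) :
    aRestoreRow hd (aDiffRow hd r) = bEmitRow hd (bKey hd r) r := by
  match r, h with
  | a :: b :: c :: d :: t, _ =>
    rw [diffRow_cons]
    unfold aRestoreRow bEmitRow bKey
    rw [pyGet1, pyGet3, pyGet1, pyGet3]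
    simp only [Option.getD_some, List.set]
    rw [add_comm (|b - hd|) hd]

-- ---- the grouping dict, characterised ----

def grpFold (hd : Int) (xs : List (List Int)) : PySem.Dict Int (List (List Int)) :=
  xs.foldl
    (fun g r => g.modify (bKey hd r) ([] : List (List Int)) (fun v => v ++ [r]))
    PySem.Dict.empty

theorem any_fst_map (ds : List Int) (f : Int → List (List Int)) (d : Int) :
    ((ds.map (fun e => (e, f e))).any (fun p => p.1 == d)) = decide (d ∈ ds) := by
  induction ds with
  | nil => simp
  | cons e t ih =>
    simp only [List.map_cons, List.any_cons, ih, List.mem_cons]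
    by_cases he : e = d
    · subst he; simp
    · simp [he, Ne.symm he]

theorem find_map_assoc (ds : List Int) (f : Int → List (List Int)) (d : Int) (hd : d ∈ ds) :
    List.find? (fun p => p.1 == d) (ds.map (fun e => (e, f e))) = some (d, f d) := by
  induction ds with
  | nil => simp at hd
  | cons e t ih =>
    by_cases he : e = d
    · subst he; simp
    · simp only [List.map_cons, List.find?_cons]
      have hne : ((e, f e).1 == d) = false := by simp [he]
      rw [hne]
      rcases List.mem_cons.1 hd with h | h
      · exact absurd h.symm he
      · exact ih h

theorem find_map_assoc_none (ds : List Int) (f : Int → List (List Int)) (d : Int) (hd : d ∉ ds) :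
    List.find? (fun p => p.1 == d) (ds.map (fun e => (e, f e))) = none := by
  apply List.find?_eq_none.2
  intro p hp
  rcases List.mem_map.1 hp with ⟨e, he, rfl⟩
  intro hbeq
  have : e = d := by simpa using hbeq
  exact hd (this ▸ he)

theorem grouping_items (hd : Int) (xs : List (List Int)) :
    (grpFold hd xs).items
      = (PySem.List.dedup (xs.map (bKey hd))).map
          (fun d => (d, xs.filter (fun r => bKey hd r == d))) := by
  induction xs using List.reverseRecOn with
  | nil => rfl
  | append_singleton xs r ih =>
    have hstep : grpFold hd (xs ++ [r])
        = (grpFold hd xs).modify (bKey hd r) [] (fun v => v ++ [r]) := by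
      unfold grpFold; rw [List.foldl_append]; rfl
    have hdedup : PySem.List.dedup ((xs ++ [r]).map (bKey hd))
        = PySem.Set.add (PySem.List.dedup (xs.map (bKey hd))) (bKey hd r) := by
      simp only [PySem.List.dedup_eq_ofList, List.map_append, List.map_cons, List.map_nil]
      unfold PySem.Set.ofList
      rw [List.foldl_append]
      rfl
    have hfilter : ∀ d, (xs ++ [r]).filter (fun r' => bKey hd r' == d)
        = xs.filter (fun r' => bKey hd r' == d) ++ (if bKey hd r = d then [r] else []) := by
      intro d
      rw [List.filter_append]
      congr 1
      by_cases h : bKey hd r = d <;> simp [h]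
    by_cases hk : bKey hd r ∈ PySem.List.dedup (xs.map (bKey hd))
    · -- existing bucket: the entry for the key is extended in place
      have hcontains : (grpFold hd xs).contains (bKey hd r) = true := by
        show ((grpFold hd xs).items.any fun p => p.1 == bKey hd r) = true
        rw [ih, any_fst_map]; simpa using hk
      have hget : (grpFold hd xs).getD (bKey hd r) []
          = xs.filter (fun r' => bKey hd r' == bKey hd r) := by
        show (Option.map (fun x => x.2)
          (List.find? (fun p => p.1 == bKey hd r) (grpFold hd xs).items)).getD [] = _
        rw [ih, find_map_assoc _ _ _ hk]; rfl
      have hadd : PySem.Set.add (PySem.List.dedup (xs.map (bKey hd))) (bKey hd r)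
          = PySem.List.dedup (xs.map (bKey hd)) := by
        unfold PySem.Set.add
        rw [if_pos (show PySem.Set.contains _ _ = true from List.contains_iff_mem.2 hk)]
      rw [hstep]
      show ((grpFold hd xs).insert (bKey hd r) ((grpFold hd xs).getD (bKey hd r) [] ++ [r])).items = _
      unfold PySem.Dict.insert
      rw [hcontains]
      simp only [if_true, hget, ih, hdedup, hadd, List.map_map]
      apply List.map_congr_left
      intro d hdmem
      simp only [Function.comp_apply]
      by_cases h : d = bKey hd r
      · subst h
        rw [hfilter]
        simp
      · have h1 : ((d, xs.filter (fun r' => bKey hd r' == d)).1 == bKey hd r) = false := by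
          simp [h]
        rw [h1]
        simp only [Bool.false_eq_true, if_false]
        rw [hfilter, if_neg (Ne.symm h), List.append_nil]
    · -- new bucket: appended at the end
      have hcontains : (grpFold hd xs).contains (bKey hd r) = false := by
        show ((grpFold hd xs).items.any fun p => p.1 == bKey hd r) = false
        rw [ih, any_fst_map]; simpa using hk
      have hget : (grpFold hd xs).getD (bKey hd r) [] = [] := by
        show (Option.map (fun x => x.2)
          (List.find? (fun p => p.1 == bKey hd r) (grpFold hd xs).items)).getD [] = []
        rw [ih, find_map_assoc_none _ _ _ hk]; rfl
      have hadd : PySem.Set.add (PySem.List.dedup (xs.map (bKey hd))) (bKey hd r)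
          = PySem.List.dedup (xs.map (bKey hd)) ++ [bKey hd r] := by
        unfold PySem.Set.add
        rw [if_neg]
        intro hc
        exact hk (List.contains_iff_mem.1 hc)
      have hFnew : xs.filter (fun r' => bKey hd r' == bKey hd r) = [] := by
        apply List.filter_eq_nil_iff.2
        intro r' hr' hpred
        refine hk ?_
        rw [PySem.List.mem_dedup]
        exact List.mem_map.2 ⟨r', hr', by simpa using hpred⟩
      rw [hstep]
      show ((grpFold hd xs).insert (bKey hd r) ((grpFold hd xs).getD (bKey hd r) [] ++ [r])).items = _
      unfold PySem.Dict.insert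
      rw [hcontains]
      simp only [Bool.false_eq_true, if_false, hget, ih]
      rw [hdedup, hadd, List.map_append, List.map_cons, List.map_nil]
      simp only [List.nil_append]
      congr 1
      · apply List.map_congr_left
        intro d hdmem
        rw [hfilter, if_neg (fun h => hk (by rw [h]; exact hdmem)), List.append_nil]
      · rw [hfilter, if_pos rfl, hFnew, List.nil_append]

theorem keys_grp (hd : Int) (xs : List (List Int)) :
    (grpFold hd xs).keys = PySem.List.dedup (xs.map (bKey hd)) := by
  show (grpFold hd xs).items.map (fun p => p.1) = _
  rw [grouping_items, List.map_map]
  simp [Function.comp_def]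

theorem getD_grp (hd : Int) (xs : List (List Int)) (d : Int)
    (h : d ∈ PySem.List.dedup (xs.map (bKey hd))) :
    (grpFold hd xs).getD d [] = xs.filter (fun r => bKey hd r == d) := by
  show (Option.map (fun x => x.2)
    (List.find? (fun p => p.1 == d) (grpFold hd xs).items)).getD [] = _
  rw [grouping_items, find_map_assoc _ _ d h]
  rfl

-- ---- stable sort = concatenation of buckets over the sorted distinct keys ----

theorem filter_insertBy_ne (f : List Int → Int) (d : Int) (x : List Int) (ys : List (List Int))
    (hx : f x ≠ d) :
    (PySem.List.insertBy (fun a b => decide (f a < f b)) x ys).filter (fun y => f y == d)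
      = ys.filter (fun y => f y == d) := by
  induction ys with
  | nil => simp [PySem.List.insertBy, hx]
  | cons y ys ih =>
    simp only [PySem.List.insertBy]
    by_cases hb : decide (f x < f y) = true
    · simp [hb, hx]
    · simp only [hb, Bool.false_eq_true, if_false, List.filter_cons, ih]

theorem filter_insertBy_eq (f : List Int → Int) (d : Int) (x : List Int) (ys : List (List Int))
    (hx : f x = d) (hpw : ys.Pairwise (fun a b => f a ≤ f b)) :
    (PySem.List.insertBy (fun a b => decide (f a < f b)) x ys).filter (fun y => f y == d)
      = ys.filter (fun y => f y == d) ++ [x] := by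
  induction ys with
  | nil => simp [PySem.List.insertBy, hx]
  | cons y ys ih =>
    rcases List.pairwise_cons.1 hpw with ⟨hy, hpw'⟩
    by_cases hb : decide (f x < f y) = true
    · have hlt : f x < f y := of_decide_eq_true hb
      have hempty : (y :: ys).filter (fun y => f y == d) = [] := by
        apply List.filter_eq_nil_iff.2
        intro z hz hpred
        have hfz : f z = d := by simpa using hpred
        have hge : f y ≤ f z := by
          rcases List.mem_cons.1 hz with h | h
          · exact h ▸ le_refl _
          · exact hy z h
        omega
      have hif : PySem.List.insertBy (fun a b => decide (f a < f b)) x (y :: ys)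
          = x :: y :: ys := by
        simp only [PySem.List.insertBy, hb, if_true]
      rw [hif, List.filter_cons, hempty]
      simp [hx]
    · have hif : PySem.List.insertBy (fun a b => decide (f a < f b)) x (y :: ys)
          = y :: PySem.List.insertBy (fun a b => decide (f a < f b)) x ys := by
        simp only [PySem.List.insertBy, hb, Bool.false_eq_true, if_false]
      rw [hif, List.filter_cons, List.filter_cons, ih hpw']
      by_cases hyd : (f y == d) = true <;> simp [hyd]

theorem sorted_append_singleton (f : List Int → Int) (xs : List (List Int)) (x : List Int) :
    PySem.List.sorted (xs ++ [x]) f false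
      = PySem.List.insertBy (fun a b => decide (f a < f b)) x (PySem.List.sorted xs f false) := by
  rw [PySem.List.sorted_eq_foldl_insertBy, PySem.List.sorted_eq_foldl_insertBy,
    List.foldl_append]
  rfl

theorem filter_sorted (f : List Int → Int) (xs : List (List Int)) (d : Int) :
    (PySem.List.sorted xs f false).filter (fun y => f y == d)
      = xs.filter (fun y => f y == d) := by
  induction xs using List.reverseRecOn with
  | nil => rfl
  | append_singleton xs x ih =>
    rw [sorted_append_singleton, List.filter_append]
    by_cases hx : f x = d
    · rw [filter_insertBy_eq f d x _ hx (PySem.List.sorted_pairwise xs f), ih]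
      simp [hx]
    · rw [filter_insertBy_ne f d x _ hx, ih]
      simp [hx]

-- a key-sorted list is determined by its per-key filters (stability uniqueness)
theorem uniq_stable (f : List Int → Int) :
    ∀ (ys zs : List (List Int)), ys.Pairwise (fun a b => f a ≤ f b)
      → zs.Pairwise (fun a b => f a ≤ f b)
      → (∀ d, ys.filter (fun y => f y == d) = zs.filter (fun y => f y == d))
      → ys = zs := by
  intro ys
  induction ys with
  | nil =>
    intro zs _ _ hfil
    cases zs with
    | nil => rfl
    | cons z zs' =>
      have := hfil (f z)
      simp at this
  | cons y ys' ih =>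
    intro zs hpy hpz hfil
    cases zs with
    | nil =>
      have := hfil (f y)
      simp at this
    | cons z zs' =>
      rcases List.pairwise_cons.1 hpy with ⟨hy, hpy'⟩
      rcases List.pairwise_cons.1 hpz with ⟨hz, hpz'⟩
      have hkey : f y = f z := by
        have h1 : ∃ w ∈ z :: zs', f w = f y := by
          have hmem : y ∈ (z :: zs').filter (fun w => f w == f y) := by
            rw [← hfil (f y)]
            simp
          rcases List.mem_filter.1 hmem with ⟨hm, hp⟩
          exact ⟨y, hm, by simpa using hp⟩
        have h2 : ∃ w ∈ y :: ys', f w = f z := by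
          have hmem : z ∈ (y :: ys').filter (fun w => f w == f z) := by
            rw [hfil (f z)]
            simp
          rcases List.mem_filter.1 hmem with ⟨hm, hp⟩
          exact ⟨z, hm, by simpa using hp⟩
        rcases h1 with ⟨w1, hw1, hfw1⟩
        rcases h2 with ⟨w2, hw2, hfw2⟩
        have hle1 : f z ≤ f y := by
          rcases hw1 with _ | hw1'
          · omega
          · have := hz w1 (by assumption); omega
        have hle2 : f y ≤ f z := by
          rcases hw2 with _ | hw2'
          · omega
          · have := hy w2 (by assumption); omega
        omega
      have hhead := hfil (f y)
      simp only [List.filter_cons, beq_self_eq_true, if_true] at hhead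
      rw [show (f z == f y) = true by simp [hkey]] at hhead
      have hyz : y = z := (List.cons.injEq _ _ _ _ ▸ hhead).1
      have htails : ∀ d, ys'.filter (fun w => f w == d) = zs'.filter (fun w => f w == d) := by
        intro d
        by_cases hd : f y = d
        · subst hd
          exact (List.cons.injEq _ _ _ _ ▸ hhead).2
        · have := hfil d
          simp only [List.filter_cons] at this
          rw [show (f y == d) = false by simpa using hd,
            show (f z == d) = false by simp [← hkey]; omega] at this
          simpa using this
      rw [hyz, ih zs' hpy' hpz' htails]

theorem groups_pairwise (f : List Int → Int) (ds : List Int) (xs : List (List Int))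
    (h : ds.Pairwise (· < ·)) :
    (ds.flatMap (fun d => xs.filter (fun r => f r == d))).Pairwise (fun a b => f a ≤ f b) := by
  induction ds with
  | nil => simp
  | cons d t ih =>
    rcases List.pairwise_cons.1 h with ⟨hdlt, ht⟩
    rw [List.flatMap_cons, List.pairwise_append]
    refine ⟨?_, ih ht, ?_⟩
    · apply List.pairwise_of_forall_mem_list
      intro a ha b hb
      have h1 : f a = d := by simpa using (List.mem_filter.1 ha).2
      have h2 : f b = d := by simpa using (List.mem_filter.1 hb).2
      omega
    · intro a ha b hb
      have h1 : f a = d := by simpa using (List.mem_filter.1 ha).2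
      rcases List.mem_flatMap.1 hb with ⟨d', hd', hb'⟩
      have h2 : f b = d' := by simpa using (List.mem_filter.1 hb').2
      have := hdlt d' hd'
      omega

theorem flatMap_ite_single (G : List (List Int)) (d : Int) :
    ∀ (ds : List Int), ds.Nodup →
      (ds.flatMap (fun e => if e = d then G else [])) = if d ∈ ds then G else [] := by
  intro ds
  induction ds with
  | nil => simp
  | cons e t ih =>
    intro hnd
    rcases List.nodup_cons.1 hnd with ⟨he, ht⟩
    rw [List.flatMap_cons, ih ht]
    by_cases hed : e = d
    · subst hed
      simp [he]
    · by_cases hdt : d ∈ t <;> simp [hed, hdt, Ne.symm hed]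

theorem groups_filter (f : List Int → Int) (ds : List Int) (xs : List (List Int)) (d : Int)
    (hnd : ds.Nodup) (hmem : ∀ e, e ∈ ds ↔ e ∈ xs.map f) :
    (ds.flatMap (fun e => xs.filter (fun r => f r == e))).filter (fun r => f r == d)
      = xs.filter (fun r => f r == d) := by
  rw [List.filter_flatMap]
  have hgrp : ∀ e, (xs.filter (fun r => f r == e)).filter (fun r => f r == d)
      = if e = d then xs.filter (fun r => f r == d) else [] := by
    intro e
    rw [List.filter_filter]
    by_cases he : e = d
    · subst he
      simp
    · rw [if_neg he]
      apply List.filter_eq_nil_iff.2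
      intro r _ hp
      rcases Bool.and_eq_true _ _ ▸ hp with ⟨hp1, hp2⟩
      have h1 : f r = d := by simpa using hp1
      have h2 : f r = e := by simpa using hp2
      exact he (by omega)
  calc ds.flatMap (fun e => (xs.filter (fun r => f r == e)).filter (fun r => f r == d))
      = ds.flatMap (fun e => if e = d then xs.filter (fun r => f r == d) else []) := by
        rw [List.flatMap, List.flatMap, List.map_congr_left (fun e _ => hgrp e)]
    _ = if d ∈ ds then xs.filter (fun r => f r == d) else [] :=
        flatMap_ite_single _ d ds hnd
    _ = xs.filter (fun r => f r == d) := by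
        by_cases hds : d ∈ ds
        · simp [hds]
        · have : d ∉ xs.map f := fun h => hds ((hmem d).2 h)
          rw [if_neg hds]
          symm
          apply List.filter_eq_nil_iff.2
          intro r hr hp
          exact this (List.mem_map.2 ⟨r, hr, by simpa using hp⟩)

-- the stable sort is exactly the buckets laid out over the sorted distinct keys
theorem stable_groups (f : List Int → Int) (xs : List (List Int)) :
    PySem.List.sorted xs f false
      = (PySem.List.sorted (PySem.List.dedup (xs.map f)) (fun x => x) false).flatMap
          (fun d => xs.filter (fun r => f r == d)) := by
  set ds := PySem.List.sorted (PySem.List.dedup (xs.map f)) (fun x => x) false with hds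
  have hperm : ds.Perm (PySem.List.dedup (xs.map f)) := PySem.List.sorted_perm _ _ _
  have hnd : ds.Nodup := hperm.nodup_iff.2 (PySem.List.nodup_dedup _)
  have hmem : ∀ e, e ∈ ds ↔ e ∈ xs.map f := by
    intro e
    rw [hperm.mem_iff, PySem.List.mem_dedup]
  have hlt : ds.Pairwise (· < ·) := by
    rw [hds, PySem.List.dedup_eq_ofList]
    exact PySem.List.sorted_ofList_pairwise_lt _
  exact uniq_stable f _ _ (PySem.List.sorted_pairwise xs f) (groups_pairwise f ds xs hlt)
    (fun d => by rw [filter_sorted, groups_filter f ds xs d hnd hmem])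

-- ===== VERDICT (by name: the statement is the Claim_ definition above) =====
theorem time_select_spec : Claim_equal_time_select := by
  intro hd xs _ hpre
  show time_select hd xs = time_select_alt hd xs
  set K := bKey hd with hK
  -- A's side: the diff-mutation pass commutes with the sort, leaving a sort by K
  have hA : time_select hd xs
      = (PySem.List.sorted xs K false).map (fun r => bEmitRow hd (K r) r) := by
    show (PySem.List.sorted (xs.map (aDiffRow hd))
      (fun k => (PySem.List.pyGet? k 1).getD 0) false).map (aRestoreRow hd) = _
    rw [sorted_map_key_eq (aDiffRow hd) (fun k => (PySem.List.pyGet? k 1).getD 0) K xs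
        (fun x hx => key_eq_of_len hd x (hpre x hx)),
      List.map_map]
    exact List.map_congr_left (fun r hr =>
      row_eq_of_len hd r (hpre r ((PySem.List.mem_sorted _ _ _ _).1 hr)))
  -- B's side: fold over the sorted distinct keys, each bucket emitted in order
  have hkeys : (grpFold hd xs).keys = PySem.List.dedup (xs.map K) := keys_grp hd xs
  set ds := PySem.List.sorted (PySem.List.dedup (xs.map K)) (fun x => x) false with hds
  have hdsmem : ∀ d ∈ ds, d ∈ PySem.List.dedup (xs.map K) :=
    fun d h => (PySem.List.mem_sorted _ _ _ _).1 h
  have hB : time_select_alt hd xs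
      = ds.flatMap (fun d => (xs.filter (fun r => K r == d)).map (bEmitRow hd d)) := by
    have hshape : time_select_alt hd xs
        = (PySem.List.sorted (grpFold hd xs).keys (fun x => x) false).foldl
            (fun T d => ((grpFold hd xs).getD d []).foldl
              (fun T r => T ++ [bEmitRow hd d r]) T) [] := rfl
    rw [hshape, hkeys, ← hds]
    calc ds.foldl (fun T d =>
            ((grpFold hd xs).getD d []).foldl (fun T r => T ++ [bEmitRow hd d r]) T) []
        = ds.foldl (fun T d =>
            T ++ (xs.filter (fun r => K r == d)).map (bEmitRow hd d)) [] := by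
          apply PySem.List.foldl_congr_mem
          intro T d hdmem
          rw [PySem.List.foldl_append_singleton_eq_map, getD_grp hd xs d (hdsmem d hdmem)]
      _ = _ := by
          rw [PySem.List.foldl_append_eq_flatMap]
          rfl
  rw [hA, hB, stable_groups K xs, List.map_flatMap]
  apply congrArg List.flatten
  apply List.map_congr_left
  intro d _
  apply List.map_congr_left
  intro r hr
  have : K r = d := by simpa using (List.mem_filter.1 hr).2
  rw [this]
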